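-- pv_equiv track=rewrite | github.com/sergio7776/cultura_general_challenge | comodines.py | listaProbabilidades
-- ===== SOURCE A (Python) =====
-- def listaProbabilidades(correcto, incorrecto):
--     probabilidades = []
--     i = 0
--     while (i < correcto):
--         if (i < incorrecto):
--             probabilidades.append("I")
--         probabilidades.append("C")
--         i += 1
--     return probabilidades
-- ===== SOURCE B (Python) =====
-- def listaProbabilidades(correcto, incorrecto):
--     n = max(0, correcto)
--     m = max(0, min(correcto, incorrecto))
--     return ["I", "C"] * m + ["C"] * (n - m)
-- ===== Notes on version B (the rewrite author's own statement) =====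
-- stated objective: simpler
-- what changed: Replaced the per-iteration while loop with a branch inside by a closed-form construction: m clamped copies of ['I','C'] followed by n-m copies of ['C'] via list multiplication.
import Mathlib
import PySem

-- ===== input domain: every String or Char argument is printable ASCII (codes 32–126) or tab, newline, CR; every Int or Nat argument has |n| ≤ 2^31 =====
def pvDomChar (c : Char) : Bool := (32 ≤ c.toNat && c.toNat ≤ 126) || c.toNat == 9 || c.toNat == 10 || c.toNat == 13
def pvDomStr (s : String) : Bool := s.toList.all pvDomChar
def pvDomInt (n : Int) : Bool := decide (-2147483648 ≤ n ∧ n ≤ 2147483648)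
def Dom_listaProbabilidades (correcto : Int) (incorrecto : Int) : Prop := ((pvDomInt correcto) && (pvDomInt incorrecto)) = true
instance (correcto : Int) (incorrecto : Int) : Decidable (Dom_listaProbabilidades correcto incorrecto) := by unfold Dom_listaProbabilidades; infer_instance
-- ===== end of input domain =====

-- B replaces A's while loop (branching per iteration) by a closed-form list construction; objective: simpler.


-- ===== PORT A =====
-- while (i < correcto): runs for (correcto - i) more iterations; fuel = correcto.toNat with i from 0.
def listaProbabilidadesGo (incorrecto : Int) : Nat → Int → List String → List String
  | 0, _, acc => acc
  | fuel + 1, i, acc =>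
      listaProbabilidadesGo incorrecto fuel (i + 1)
        ((acc ++ (if i < incorrecto then ["I"] else [])) ++ ["C"])

def listaProbabilidades (correcto : Int) (incorrecto : Int) : List String :=
  listaProbabilidadesGo incorrecto correcto.toNat 0 []

-- ===== PORT B =====
def listaProbabilidades_alt (correcto : Int) (incorrecto : Int) : List String :=
  let n : Int := max 0 correcto
  let m : Int := max 0 (min correcto incorrecto)
  (List.replicate m.toNat (["I", "C"] : List String)).flatten ++ List.replicate (n - m).toNat "C"

-- ===== PRECONDITION & SPEC =====
def Spec_listaProbabilidades (correcto : Int) (incorrecto : Int) (out : List String) : Prop := out = listaProbabilidades_alt correcto incorrecto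
instance (correcto : Int) (incorrecto : Int) (out : List String) : Decidable (Spec_listaProbabilidades correcto incorrecto out) := by unfold Spec_listaProbabilidades; infer_instance

-- ===== CLAIM (what is proved, stated in full; the proofs are below) =====
def Claim_equal_listaProbabilidades : Prop := ∀ (correcto : Int) (incorrecto : Int), Dom_listaProbabilidades correcto incorrecto → Spec_listaProbabilidades correcto incorrecto (listaProbabilidades correcto incorrecto)

-- ===== LEMMAS AND PROOFS =====

-- Closed form of B's value, parameterised by iteration counts (n = total, m = leading I positions).
def pvClosed (n m : Nat) : List String :=
  (List.replicate m (["I", "C"] : List String)).flatten ++ List.replicate (n - m) "C"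

theorem pvGo_closed (incorrecto : Int) (fuel : Nat) (i : Int) (acc : List String) :
    listaProbabilidadesGo incorrecto fuel i acc
      = acc ++ pvClosed fuel ((min (i + fuel) incorrecto - i).toNat) := by
  induction fuel generalizing i acc with
  | zero =>
      simp [listaProbabilidadesGo, pvClosed]
  | succ k ih =>
      rw [listaProbabilidadesGo, ih]
      push_cast
      by_cases h : i < incorrecto
      · have hm : (min (i + (k + 1)) incorrecto - i).toNat
            = (min ((i + 1) + k) incorrecto - (i + 1)).toNat + 1 := by omega
        have hsub : (k + 1) - ((min ((i + 1) + k) incorrecto - (i + 1)).toNat + 1)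
            = k - (min ((i + 1) + k) incorrecto - (i + 1)).toNat := by omega
        rw [hm]
        simp [pvClosed, List.replicate_succ, hsub, h]
      · have hm : (min (i + (k + 1)) incorrecto - i).toNat = 0 := by omega
        have hm' : (min ((i + 1) + k) incorrecto - (i + 1)).toNat = 0 := by omega
        rw [hm']
        rw [hm]
        simp [pvClosed, h, List.replicate_succ]

-- ===== VERDICT (by name: the statement is the Claim_ definition above) =====
theorem listaProbabilidades_spec : Claim_equal_listaProbabilidades := by
  intro c i _
  unfold Spec_listaProbabilidades listaProbabilidades listaProbabilidades_alt
  rw [pvGo_closed]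
  simp only [pvClosed, List.nil_append]
  have h1 : (min (0 + (c.toNat : Int)) i - 0).toNat = (max 0 (min c i)).toNat := by omega
  have h2 : c.toNat - (max 0 (min c i)).toNat = (max 0 c - max 0 (min c i)).toNat := by omega
  rw [h1, h2]
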